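-- pv_equiv track=rewrite | github.com/mateoias/trump_tweet_analysis | python_code/create_word_cloud_by_topic.py | find_relevant_tweets
-- ===== SOURCE A (Python) =====
-- def find_relevant_tweets(user_topic_words, tweet_text):
-- 	relevant_tweet_list = set()
-- 	for tweet in tweet_text:
-- 		for word in tweet.split(" "):
-- 			if word in user_topic_words:
-- 				relevant_tweet_list.add(tweet)
-- 				break
-- 	return relevant_tweet_list
-- ===== SOURCE B (Python) =====
-- def find_relevant_tweets(user_topic_words, tweet_text):
--     # Pass 1: inverted index word -> set of tweet indices containing it.
--     index = {}
--     for i, tweet in enumerate(tweet_text):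
--         for word in tweet.split(" "):
--             index.setdefault(word, set()).add(i)
--     # Pass 2: union the postings of the topic words.
--     hits = set()
--     for word in user_topic_words:
--         hits |= index.get(word, set())
--     # Pass 3: collect the tweets at the hit indices.
--     return {tweet for i, tweet in enumerate(tweet_text) if i in hits}
-- ===== Notes on version B (the rewrite author's own statement) =====
-- stated objective: alternative
-- what changed: Reverses the traversal: instead of scanning each tweet's words against the topic list with an early break, B builds an inverted index mapping every word to the set of tweet indices containing it, unions the postings of the topic words into a hit-index set, and selects the tweets at those indices in a final pass.
import Mathlib
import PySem

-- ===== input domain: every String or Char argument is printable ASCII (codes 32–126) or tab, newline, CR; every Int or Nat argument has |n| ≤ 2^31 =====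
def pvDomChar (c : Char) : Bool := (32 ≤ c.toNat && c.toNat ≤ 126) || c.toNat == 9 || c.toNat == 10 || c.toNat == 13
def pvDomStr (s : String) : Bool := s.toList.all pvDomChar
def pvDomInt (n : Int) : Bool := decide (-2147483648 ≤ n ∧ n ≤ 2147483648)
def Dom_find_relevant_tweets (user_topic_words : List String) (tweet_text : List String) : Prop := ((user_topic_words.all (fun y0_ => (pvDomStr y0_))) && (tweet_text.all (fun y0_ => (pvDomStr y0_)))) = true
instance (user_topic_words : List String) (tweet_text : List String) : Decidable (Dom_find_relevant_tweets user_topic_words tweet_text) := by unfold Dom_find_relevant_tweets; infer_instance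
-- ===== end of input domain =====

-- B reverses the traversal: it builds an inverted index word -> set of tweet indices,
-- unions the postings of the topic words into a hit set, and selects tweets by index
-- (objective: alternative). Both return a Python set; List String holds its distinct elements.

-- ===== PORT A =====
-- inner 'for word in tweet.split(" "): if word in user_topic_words: add; break'
def pvA_words (user_topic_words : List String) (s : PySem.Set String)
    (tweet : String) : List String → PySem.Set String
  | [] => s
  | w :: ws =>
      if w ∈ user_topic_words then PySem.Set.add s tweet
      else pvA_words user_topic_words s tweet ws

def find_relevant_tweets (user_topic_words : List String) (tweet_text : List String) : List String :=
  tweet_text.foldl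
    (fun s tweet => pvA_words user_topic_words s tweet ((PySem.Str.split? tweet " ").getD []))
    PySem.Set.empty

-- ===== PORT B =====
-- pass 1: 'index.setdefault(word, set()).add(i)' = index[word] = index.get(word, set()) ∪ {i}
def pvB_index (tweet_text : List String) : PySem.Dict String (PySem.Set Int) :=
  (PySem.List.enumerate tweet_text).foldl
    (fun d p =>
      ((PySem.Str.split? p.2 " ").getD []).foldl
        (fun d w => d.modify w PySem.Set.empty (fun s => PySem.Set.add s p.1)) d)
    PySem.Dict.empty

def find_relevant_tweets_alt (user_topic_words : List String) (tweet_text : List String) : List String :=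
  let index := pvB_index tweet_text
  -- pass 2: 'hits |= index.get(word, set())'
  let hits : PySem.Set Int :=
    user_topic_words.foldl
      (fun h w => PySem.Set.union h (index.getD w PySem.Set.empty)) PySem.Set.empty
  -- pass 3: '{tweet for i, tweet in enumerate(tweet_text) if i in hits}'
  PySem.Set.ofList
    (((PySem.List.enumerate tweet_text).filter (fun p => PySem.Set.contains hits p.1)).map (·.2))

-- ===== PRECONDITION & SPEC =====
def Spec_find_relevant_tweets (user_topic_words : List String) (tweet_text : List String) (out : List String) : Prop := out = find_relevant_tweets_alt user_topic_words tweet_text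
instance (user_topic_words : List String) (tweet_text : List String) (out : List String) : Decidable (Spec_find_relevant_tweets user_topic_words tweet_text out) := by unfold Spec_find_relevant_tweets; infer_instance

-- ===== CLAIM (what is proved, stated in full; the proofs are below) =====
def Claim_equal_find_relevant_tweets : Prop := ∀ (user_topic_words : List String) (tweet_text : List String), Dom_find_relevant_tweets user_topic_words tweet_text → Spec_find_relevant_tweets user_topic_words tweet_text (find_relevant_tweets user_topic_words tweet_text)

-- ===== LEMMAS AND PROOFS =====

-- the tweet-level predicate both programs decide: some word of the split is a topic word
def pvHit (utw : List String) (t : String) : Bool :=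
  ((PySem.Str.split? t " ").getD []).any (fun w => decide (w ∈ utw))

-- A's inner loop adds the tweet iff some word of the split is a topic word.
theorem pvA_words_eq (utw : List String) (s : PySem.Set String) (t : String)
    (ws : List String) :
    pvA_words utw s t ws =
      if ws.any (fun w => decide (w ∈ utw)) then PySem.Set.add s t else s := by
  induction ws with
  | nil => simp [pvA_words]
  | cons w ws ih =>
      by_cases h : w ∈ utw <;> simp [pvA_words, h, ih]

-- A conditional-add fold is an unconditional fold over the filtered list.
theorem foldl_if_add_eq (p : String → Bool) (l : List String) (s : PySem.Set String) :
    l.foldl (fun s t => if p t then PySem.Set.add s t else s) s =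
      (l.filter p).foldl PySem.Set.add s := by
  induction l generalizing s with
  | nil => rfl
  | cons t l ih =>
      by_cases h : p t <;> simp [List.foldl, h, ih]

-- membership in the postings after indexing the word list of one tweet (index i)
theorem pvB_inner_mem (ws : List String) (d : PySem.Dict String (PySem.Set Int))
    (i j : Int) (w : String) :
    j ∈ (ws.foldl (fun d w => d.modify w PySem.Set.empty (fun s => PySem.Set.add s i)) d).getD
          w PySem.Set.empty ↔
      j ∈ d.getD w PySem.Set.empty ∨ (w ∈ ws ∧ j = i) := by
  induction ws generalizing d with
  | nil => simp
  | cons v ws ih =>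
      simp only [List.foldl, ih, PySem.Dict.getD_modify]
      by_cases h : w = v
      · subst h
        simp [PySem.Set.mem_add]
        tauto
      · simp [h]

-- membership in the postings of the full inverted index
theorem pvB_index_mem (tt : List String) (n : Int)
    (d : PySem.Dict String (PySem.Set Int)) (j : Int) (w : String) :
    j ∈ ((PySem.List.enumerate tt n).foldl
          (fun d p => ((PySem.Str.split? p.2 " ").getD []).foldl
            (fun d w => d.modify w PySem.Set.empty (fun s => PySem.Set.add s p.1)) d) d).getD
          w PySem.Set.empty ↔
      j ∈ d.getD w PySem.Set.empty ∨
        ∃ p ∈ PySem.List.enumerate tt n, j = p.1 ∧ w ∈ (PySem.Str.split? p.2 " ").getD [] := by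
  induction tt generalizing n d with
  | nil => simp [PySem.List.enumerate_nil]
  | cons t tt ih =>
      simp only [PySem.List.enumerate_cons, List.foldl, ih, pvB_inner_mem, List.mem_cons]
      constructor
      · rintro (⟨h | ⟨hw, hj⟩⟩ | ⟨p, hp, hj, hw⟩)
        · exact Or.inl h
        · exact Or.inr ⟨(n, t), Or.inl rfl, hj, hw⟩
        · exact Or.inr ⟨p, Or.inr hp, hj, hw⟩
      · rintro (h | ⟨p, hp | hp, hj, hw⟩)
        · exact Or.inl (Or.inl h)
        · subst hp; exact Or.inl (Or.inr ⟨hw, hj⟩)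
        · exact Or.inr ⟨p, hp, hj, hw⟩

-- membership in the union of the topic words' postings
theorem pvB_hits_mem (utw : List String) (index : PySem.Dict String (PySem.Set Int))
    (h : PySem.Set Int) (j : Int) :
    j ∈ utw.foldl (fun h w => PySem.Set.union h (index.getD w PySem.Set.empty)) h ↔
      j ∈ h ∨ ∃ w ∈ utw, j ∈ index.getD w PySem.Set.empty := by
  induction utw generalizing h with
  | nil => simp
  | cons w utw ih =>
      simp only [List.foldl, ih, PySem.Set.mem_union, List.mem_cons]
      constructor
      · rintro (⟨hj | hj⟩ | ⟨w', hw', hj⟩)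
        · exact Or.inl hj
        · exact Or.inr ⟨w, Or.inl rfl, hj⟩
        · exact Or.inr ⟨w', Or.inr hw', hj⟩
      · rintro (hj | ⟨w', hw' | hw', hj⟩)
        · exact Or.inl (Or.inl hj)
        · subst hw'
          exact Or.inl (Or.inr hj)
        · exact Or.inr ⟨w', hw', hj⟩

-- an index of enumerate is in hits iff its tweet satisfies pvHit
theorem pvB_contains_eq (utw tt : List String) (p : Int × String)
    (hp : p ∈ PySem.List.enumerate tt) :
    PySem.Set.contains
      (utw.foldl (fun h w => PySem.Set.union h ((pvB_index tt).getD w PySem.Set.empty))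
        PySem.Set.empty) p.1 = pvHit utw p.2 := by
  rcases (PySem.List.mem_enumerate_iff _ _ _).1 hp with ⟨k, hk, hpk⟩
  rw [zero_add] at hpk
  subst hpk
  dsimp only
  have key : ((k : Int) ∈ utw.foldl
      (fun h w => PySem.Set.union h ((pvB_index tt).getD w PySem.Set.empty))
      PySem.Set.empty) ↔ pvHit utw tt[k] = true := by
    rw [pvB_hits_mem]
    constructor
    · rintro (hmem | ⟨w, hw, hmem⟩)
      · simp [PySem.Set.empty] at hmem
      · unfold pvB_index at hmem
        rw [pvB_index_mem] at hmem
        rcases hmem with hmem | ⟨q, hq, hj, hwq⟩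
        · simp [PySem.Dict.getD_empty, PySem.Set.empty] at hmem
        · rcases (PySem.List.mem_enumerate_iff _ _ _).1 hq with ⟨k', hk', hqk⟩
          subst hqk
          dsimp only at hj hwq
          rw [zero_add] at hj
          have hkk : k' = k := by exact_mod_cast hj.symm
          subst hkk
          unfold pvHit
          simp only [List.any_eq_true, decide_eq_true_iff]
          exact ⟨w, hwq, hw⟩
    · intro h
      unfold pvHit at h
      simp only [List.any_eq_true, decide_eq_true_iff] at h
      rcases h with ⟨w, hwmem, hwu⟩
      refine Or.inr ⟨w, hwu, ?_⟩
      unfold pvB_index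
      rw [pvB_index_mem]
      exact Or.inr ⟨((k : Int), tt[k]), hp, rfl, hwmem⟩
  simp only [PySem.Set.contains_eq_listContains, List.contains_eq_mem]
  cases hb : pvHit utw tt[k] with
  | true => exact decide_eq_true (key.2 hb)
  | false =>
      apply decide_eq_false
      intro hmem
      have := key.1 hmem
      rw [hb] at this
      exact Bool.false_ne_true this

-- filtering enumerate by a predicate on the tweet, then projecting, filters the list itself
theorem pvB_filter_map (tt : List String) (q : String → Bool) (n : Int) :
    (((PySem.List.enumerate tt n).filter (fun p => q p.2)).map (·.2)) = tt.filter q := by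
  induction tt generalizing n with
  | nil => simp [PySem.List.enumerate_nil]
  | cons t tt ih =>
      simp only [PySem.List.enumerate_cons, List.filter_cons]
      by_cases h : q t <;> simp [h, ih]

-- ===== VERDICT (by name: the statement is the Claim_ definition above) =====
theorem find_relevant_tweets_spec : Claim_equal_find_relevant_tweets := by
  intro utw tt _
  unfold Spec_find_relevant_tweets find_relevant_tweets find_relevant_tweets_alt
  simp only [pvA_words_eq]
  have hA := foldl_if_add_eq (pvHit utw) tt PySem.Set.empty
  unfold pvHit at hA
  rw [hA]
  rw [List.filter_congr (fun p hp => pvB_contains_eq utw tt p hp)]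
  rw [pvB_filter_map]
  rw [PySem.Set.ofList_eq_foldl]
  rfl
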